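-- pv_equiv track=rewrite | github.com/AlexanderGeorge102934/ChatBot | chatbot.py | get_dep_categories
-- ===== SOURCE A (Python) =====
-- def get_dep_categories(parsed_input):
--     num_nsubj = 0
--     num_obj = 0
--     num_iobj = 0
--     num_nmod = 0
--     num_amod = 0
--
--     # Split the parsed_input by lines
--     lines = parsed_input.strip().splitlines()
--
--     # Iterate over each line and check for specific dependencies
--     for line in lines:
--         parts = line.split()  # Split each line by whitespace to access relation type
--         if len(parts) >= 4:  # Ensure there are enough columns
--             relation = parts[3]  # The fourth column should be the relation type
--
--             # Increment counts based on the relation type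
--             if relation == 'nsubj':
--                 num_nsubj += 1
--             elif relation == 'obj':
--                 num_obj += 1
--             elif relation == 'iobj':
--                 num_iobj += 1
--             elif relation == 'nmod':
--                 num_nmod += 1
--             elif relation == 'amod':
--                 num_amod += 1
--
--     return num_nsubj, num_obj, num_iobj, num_nmod, num_amod
-- ===== SOURCE B (Python) =====
-- def get_dep_categories(parsed_input):
--     # Staged passes: first extract the 4th column of every well-formed line,
--     # then count each relation of interest with a separate .count() pass.
--     rels = [p[3] for line in parsed_input.strip().splitlines()
--             for p in [line.split()] if len(p) >= 4]
--     return tuple(rels.count(k) for k in ('nsubj', 'obj', 'iobj', 'nmod', 'amod'))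
-- ===== Notes on version B (the rewrite author's own statement) =====
-- stated objective: idiomatic
-- what changed: Replaces A's single pass with five threaded accumulators and an if/elif dispatch by staged passes: extract the relation column once into a list, then obtain each of the five results by an independent list.count scan.
import Mathlib
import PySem

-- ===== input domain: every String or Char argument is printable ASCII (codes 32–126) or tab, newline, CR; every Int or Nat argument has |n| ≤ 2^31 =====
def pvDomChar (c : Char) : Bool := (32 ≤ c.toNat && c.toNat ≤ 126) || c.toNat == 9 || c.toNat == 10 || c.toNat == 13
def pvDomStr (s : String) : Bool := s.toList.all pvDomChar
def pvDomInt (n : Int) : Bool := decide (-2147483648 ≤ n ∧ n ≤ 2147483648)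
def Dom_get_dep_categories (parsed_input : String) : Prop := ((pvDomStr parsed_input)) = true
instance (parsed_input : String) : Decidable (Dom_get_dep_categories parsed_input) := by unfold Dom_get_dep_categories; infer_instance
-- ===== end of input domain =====

-- B replaces A's single pass with five threaded accumulators and an if/elif dispatch by staged
-- passes: extract the relation column once, then count each relation with an independent scan.

-- ===== PORT A =====
-- one line of A's loop body: five counters threaded through, branch order as in A
def pvStepA (st : Int × Int × Int × Int × Int) (line : String) : Int × Int × Int × Int × Int :=
  let parts := PySem.Str.split₀ line
  if parts.length ≥ 4 then
    let relation := parts.getD 3 ""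
    if relation = "nsubj" then (st.1 + 1, st.2.1, st.2.2.1, st.2.2.2.1, st.2.2.2.2)
    else if relation = "obj" then (st.1, st.2.1 + 1, st.2.2.1, st.2.2.2.1, st.2.2.2.2)
    else if relation = "iobj" then (st.1, st.2.1, st.2.2.1 + 1, st.2.2.2.1, st.2.2.2.2)
    else if relation = "nmod" then (st.1, st.2.1, st.2.2.1, st.2.2.2.1 + 1, st.2.2.2.2)
    else if relation = "amod" then (st.1, st.2.1, st.2.2.1, st.2.2.2.1, st.2.2.2.2 + 1)
    else st
  else st

def get_dep_categories (parsed_input : String) : Int × Int × Int × Int × Int :=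
  let lines := PySem.Str.splitlines (PySem.Str.strip parsed_input)
  lines.foldl pvStepA (0, 0, 0, 0, 0)

-- ===== PORT B =====
-- parts[3] of a line, when the line has at least 4 whitespace-separated columns
def pvRelOf (line : String) : Option String :=
  let parts := PySem.Str.split₀ line
  if parts.length ≥ 4 then some (parts.getD 3 "") else none

def get_dep_categories_alt (parsed_input : String) : Int × Int × Int × Int × Int :=
  let rels := (PySem.Str.splitlines (PySem.Str.strip parsed_input)).filterMap pvRelOf
  ((PySem.List.count rels "nsubj" : Int), (PySem.List.count rels "obj" : Int),
   (PySem.List.count rels "iobj" : Int), (PySem.List.count rels "nmod" : Int),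
   (PySem.List.count rels "amod" : Int))

-- ===== PRECONDITION & SPEC =====
def Spec_get_dep_categories (parsed_input : String) (out : Int × Int × Int × Int × Int) : Prop := out = get_dep_categories_alt parsed_input
instance (parsed_input : String) (out : Int × Int × Int × Int × Int) : Decidable (Spec_get_dep_categories parsed_input out) := by unfold Spec_get_dep_categories; infer_instance

-- ===== CLAIM (what is proved, stated in full; the proofs are below) =====
def Claim_equal_get_dep_categories : Prop := ∀ (parsed_input : String), Dom_get_dep_categories parsed_input → Spec_get_dep_categories parsed_input (get_dep_categories parsed_input)

-- ===== LEMMAS AND PROOFS =====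

-- A's fold over the lines adds, component-wise, the multiplicities of the five relations among the extracted relation list
lemma pvFoldA_eq_counts (lines : List String) (a b c d e : Int) :
    lines.foldl pvStepA (a, b, c, d, e) =
      (a + ((lines.filterMap pvRelOf).count "nsubj" : Int),
       b + ((lines.filterMap pvRelOf).count "obj" : Int),
       c + ((lines.filterMap pvRelOf).count "iobj" : Int),
       d + ((lines.filterMap pvRelOf).count "nmod" : Int),
       e + ((lines.filterMap pvRelOf).count "amod" : Int)) := by
  induction lines generalizing a b c d e with
  | nil => simp
  | cons l ls ih =>
    rw [List.foldl_cons, List.filterMap_cons]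
    by_cases h4 : (PySem.Str.split₀ l).length ≥ 4
    · have hrel : pvRelOf l = some ((PySem.Str.split₀ l).getD 3 "") := by
        simp [pvRelOf, h4]
      rw [hrel]
      simp only [pvStepA, h4, if_pos]
      set r := (PySem.Str.split₀ l).getD 3 "" with hr
      by_cases h1 : r = "nsubj"
      · simp [h1, ih]; omega
      · by_cases h2 : r = "obj"
        · simp [h2, ih]; omega
        · by_cases h3 : r = "iobj"
          · simp [h3, ih]; omega
          · by_cases h5 : r = "nmod"
            · simp [h5, ih]; omega
            · by_cases h6 : r = "amod"
              · simp [h6, ih]; omega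
              · simp [ih, h1, h2, h3, h5, h6]
    · have hrel : pvRelOf l = none := by simp [pvRelOf, h4]
      rw [hrel]
      simp [pvStepA, h4, ih]

-- ===== VERDICT (by name: the statement is the Claim_ definition above) =====
theorem get_dep_categories_spec : Claim_equal_get_dep_categories := by
  intro parsed_input _
  unfold Spec_get_dep_categories get_dep_categories get_dep_categories_alt
  rw [pvFoldA_eq_counts]
  simp only [PySem.List.count_eq, zero_add]
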